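-- pv_equiv track=rewrite | github.com/Bouzac/MergeToolsBot | monitor.py | trouver_pelles_a_fusionner
-- ===== SOURCE A (Python) =====
-- def trouver_pelles_a_fusionner(matrix):
--     pelles_par_niveau = {}
--     for row in matrix:
--         for cell in row:
--             niveau = cell["niveau"]
--             if niveau > 0:
--                 if niveau not in pelles_par_niveau:
--                     pelles_par_niveau[niveau] = []
--                 pelles_par_niveau[niveau].append(cell)
--
--     pelles_en_double = {}
--     for niveau, liste_cases in pelles_par_niveau.items():
--         if len(liste_cases) >= 2 and niveau > 0:
--             pelles_en_double[niveau] = liste_cases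
--     return pelles_en_double
-- ===== SOURCE B (Python) =====
-- def trouver_pelles_a_fusionner(matrix):
--     cells = [cell for row in matrix for cell in row if cell["niveau"] > 0]
--     counts = {}
--     for cell in cells:
--         n = cell["niveau"]
--         counts[n] = counts.get(n, 0) + 1
--     result = {}
--     for cell in cells:
--         n = cell["niveau"]
--         if counts[n] >= 2:
--             result.setdefault(n, []).append(cell)
--     return result
-- ===== Notes on version B (the rewrite author's own statement) =====
-- stated objective: alternative
-- what changed: B flattens the grid once, counts cells per level in a first pass, then collects in a single second pass only cells whose level count is >= 2, instead of A's build-dict-of-lists-then-filter-by-length decomposition.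
import Mathlib
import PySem

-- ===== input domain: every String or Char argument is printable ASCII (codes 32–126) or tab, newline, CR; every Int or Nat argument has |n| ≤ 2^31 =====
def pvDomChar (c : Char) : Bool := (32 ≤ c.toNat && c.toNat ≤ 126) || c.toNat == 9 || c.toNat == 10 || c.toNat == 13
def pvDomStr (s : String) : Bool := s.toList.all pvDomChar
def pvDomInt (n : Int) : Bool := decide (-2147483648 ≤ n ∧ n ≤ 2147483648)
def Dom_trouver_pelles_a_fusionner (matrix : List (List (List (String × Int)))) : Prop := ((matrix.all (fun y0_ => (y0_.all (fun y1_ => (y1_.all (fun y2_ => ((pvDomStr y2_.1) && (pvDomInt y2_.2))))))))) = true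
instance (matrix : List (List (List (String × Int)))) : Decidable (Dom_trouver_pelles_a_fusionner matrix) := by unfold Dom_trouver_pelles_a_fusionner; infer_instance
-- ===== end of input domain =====

-- B replaces A's group-into-dict-of-lists-then-filter-by-length decomposition by a flatten + count-per-level pass
-- followed by a single collecting pass that only keeps cells of levels occurring at least twice (objective: alternative).

-- cell["niveau"] (KeyError when the key is absent — those inputs are excluded by Pre_ below)
def pvNiv (cell : List (String × Int)) : Int := (PySem.Dict.mk cell).getD "niveau" 0

-- ===== PORT A =====
def trouver_pelles_a_fusionner (matrix : List (List (List (String × Int)))) : List (Int × List (List (String × Int))) :=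
  let pelles_par_niveau : PySem.Dict Int (List (List (String × Int))) :=
    matrix.foldl (fun d row =>
      row.foldl (fun d cell =>
        let niveau := pvNiv cell
        if niveau > 0 then
          let d' := if d.contains niveau then d else d.insert niveau []
          d'.modify niveau [] (fun l => l ++ [cell])
        else d) d) PySem.Dict.empty
  let pelles_en_double : PySem.Dict Int (List (List (String × Int))) :=
    pelles_par_niveau.items.foldl (fun r p =>
      if p.2.length ≥ 2 ∧ p.1 > 0 then r.insert p.1 p.2 else r) PySem.Dict.empty
  pelles_en_double.items

-- ===== PORT B =====
def trouver_pelles_a_fusionner_alt (matrix : List (List (List (String × Int)))) : List (Int × List (List (String × Int))) :=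
  let cells : List (List (String × Int)) := matrix.flatMap (fun row => row.filter (fun cell => pvNiv cell > 0))
  let counts : PySem.Dict Int Int :=
    cells.foldl (fun d cell => d.insert (pvNiv cell) (d.getD (pvNiv cell) 0 + 1)) PySem.Dict.empty
  let result : PySem.Dict Int (List (List (String × Int))) :=
    cells.foldl (fun r cell =>
      if counts.getD (pvNiv cell) 0 ≥ 2 then
        (r.setdefault (pvNiv cell) []).modify (pvNiv cell) [] (fun l => l ++ [cell])
      else r) PySem.Dict.empty
  result.items

-- ===== PRECONDITION & SPEC =====
-- Pre_ excludes exactly the inputs where some cell lacks the key "niveau": there Python A raises KeyError.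
def Pre_trouver_pelles_a_fusionner (matrix : List (List (List (String × Int)))) : Prop :=
  ∀ row ∈ matrix, ∀ cell ∈ row, (PySem.Dict.mk cell).contains "niveau" = true
instance (matrix : List (List (List (String × Int)))) : Decidable (Pre_trouver_pelles_a_fusionner matrix) := by unfold Pre_trouver_pelles_a_fusionner; infer_instance

def pvWitness_trouver_pelles_a_fusionner : (List (List (List (String × Int)))) :=
  [[[("niveau", 1)], [("niveau", 1)]], [[("niveau", 2)]]]

def Spec_trouver_pelles_a_fusionner (matrix : List (List (List (String × Int)))) (out : List (Int × List (List (String × Int)))) : Prop := out = trouver_pelles_a_fusionner_alt matrix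
instance (matrix : List (List (List (String × Int)))) (out : List (Int × List (List (String × Int)))) : Decidable (Spec_trouver_pelles_a_fusionner matrix out) := by unfold Spec_trouver_pelles_a_fusionner; infer_instance

-- ===== CLAIM (what is proved, stated in full; the proofs are below) =====
def Claim_equal_trouver_pelles_a_fusionner : Prop := ∀ (matrix : List (List (List (String × Int)))), Dom_trouver_pelles_a_fusionner matrix → Pre_trouver_pelles_a_fusionner matrix → Spec_trouver_pelles_a_fusionner matrix (trouver_pelles_a_fusionner matrix)

-- ===== LEMMAS AND PROOFS =====

-- the grouping loop both ports reduce to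
def pvGroup (l : List (List (String × Int))) : PySem.Dict Int (List (List (String × Int))) :=
  l.foldl (fun d c => d.modify (pvNiv c) [] (fun v => v ++ [c])) PySem.Dict.empty

theorem pv_modify_absorb {κ ν : Type} [BEq κ] [LawfulBEq κ]
    (d : PySem.Dict κ ν) (k : κ) (v0 : ν) (f : ν → ν) :
    (if d.contains k then d else d.insert k v0).modify k v0 f = d.modify k v0 f := by
  by_cases h : d.contains k
  · simp [h]
  · simp only [Bool.not_eq_true] at h
    simp [h, PySem.Dict.modify, PySem.Dict.getD_insert_self, PySem.Dict.insert_insert_self,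
      PySem.Dict.getD_of_not_contains _ _ h]

theorem pv_setdefault_absorb {κ ν : Type} [BEq κ] [LawfulBEq κ]
    (d : PySem.Dict κ ν) (k : κ) (v0 : ν) (f : ν → ν) :
    (d.setdefault k v0).modify k v0 f = d.modify k v0 f := by
  by_cases h : d.contains k
  · rw [PySem.Dict.setdefault_of_contains _ _ h]
  · simp only [Bool.not_eq_true] at h
    rw [PySem.Dict.setdefault_of_not_contains _ _ h]
    simp [PySem.Dict.modify, PySem.Dict.getD_insert_self, PySem.Dict.insert_insert_self,
      PySem.Dict.getD_of_not_contains _ _ h]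

theorem pvGroup_keys (l : List (List (String × Int))) :
    (pvGroup l).keys = PySem.Set.ofList (l.map pvNiv) := by
  unfold pvGroup
  rw [PySem.Dict.keys_foldl_modify_key l pvNiv [] (fun _ c v => v ++ [c])]
  rw [PySem.Dict.keys_empty, PySem.Set.update_nil_left]

theorem pvGroup_nodup (l : List (List (String × Int))) : (pvGroup l).keys.Nodup := by
  rw [pvGroup_keys]; exact PySem.Set.nodup_ofList _

theorem pvGroup_getD (l : List (List (String × Int))) (k : Int) :
    (pvGroup l).getD k [] = l.filter (fun c => pvNiv c == k) := by
  have h := PySem.Dict.getD_foldl_modify_append (l.map (fun c => (pvNiv c, c)))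
    (PySem.Dict.empty : PySem.Dict Int (List (List (String × Int)))) k
  rw [List.foldl_map] at h
  simp only [List.filter_map, List.map_map] at h
  unfold pvGroup
  simpa [Function.comp_def] using h

theorem pvGroup_items (l : List (List (String × Int))) :
    (pvGroup l).items
      = (PySem.Set.ofList (l.map pvNiv)).map (fun k => (k, l.filter (fun c => pvNiv c == k))) := by
  rw [PySem.Dict.items_eq_map_keys _ (pvGroup_nodup l) [], pvGroup_keys]
  exact List.map_congr_left (fun k _ => by rw [pvGroup_getD])

-- inserting distinct-keyed filtered items into an empty dict just lists them
theorem pv_items_insert_filter (g : PySem.Dict Int (List (List (String × Int))))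
    (hg : g.keys.Nodup) (q : Int × List (List (String × Int)) → Bool) :
    (List.foldl (fun r p => r.insert p.1 p.2) PySem.Dict.empty (g.items.filter q)).items
      = g.items.filter q := by
  rw [PySem.Dict.items_foldl_insert_fresh _ Prod.fst Prod.snd PySem.Dict.empty
    (fun _ _ => PySem.Dict.contains_empty _)
    (List.Nodup.sublist (List.Sublist.map Prod.fst List.filter_sublist) hg)]
  simp [PySem.Dict.empty]

theorem portA_eq (matrix : List (List (List (String × Int)))) :
    trouver_pelles_a_fusionner matrix
      = ((pvGroup ((matrix.flatten).filter (fun c => decide (pvNiv c > 0)))).items.filter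
          (fun p => decide (p.2.length ≥ 2 ∧ p.1 > 0))) := by
  unfold trouver_pelles_a_fusionner
  rw [← List.foldl_flatten]
  simp only [pv_modify_absorb]
  have h1 : (fun (d : PySem.Dict Int (List (List (String × Int)))) cell =>
        if pvNiv cell > 0 then d.modify (pvNiv cell) [] (fun l => l ++ [cell]) else d)
      = (fun d cell => if (fun c => decide (pvNiv c > 0)) cell = true
          then d.modify (pvNiv cell) [] (fun l => l ++ [cell]) else d) := by
    funext d cell; simp
  rw [h1, ← List.foldl_filter]
  have h2 : (fun (r : PySem.Dict Int (List (List (String × Int)))) (p : Int × List (List (String × Int))) =>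
        if p.2.length ≥ 2 ∧ p.1 > 0 then r.insert p.1 p.2 else r)
      = (fun r p => if (fun (p : Int × List (List (String × Int))) => decide (p.2.length ≥ 2 ∧ p.1 > 0)) p = true
          then r.insert p.1 p.2 else r) := by
    funext r p; simp
  rw [h2, ← List.foldl_filter]
  exact pv_items_insert_filter (pvGroup _) (pvGroup_nodup _) _

theorem portB_eq (matrix : List (List (List (String × Int)))) :
    trouver_pelles_a_fusionner_alt matrix
      = (pvGroup (((matrix.flatten).filter (fun c => decide (pvNiv c > 0))).filter
          (fun c => decide (2 ≤ (((matrix.flatten).filter (fun c => decide (pvNiv c > 0))).map pvNiv).count (pvNiv c))))).items := by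
  unfold trouver_pelles_a_fusionner_alt
  rw [List.flatMap_def, ← List.filter_flatten]
  generalize (matrix.flatten).filter (fun c => decide (pvNiv c > 0)) = cs
  have hcounts : ∀ n : Int,
      (cs.foldl (fun d cell => d.insert (pvNiv cell) (d.getD (pvNiv cell) 0 + 1)) PySem.Dict.empty).getD n 0
        = ((cs.map pvNiv).count n : Int) := by
    intro n
    have h := PySem.Dict.getD_foldl_insert_add_one (cs.map pvNiv) PySem.Dict.empty n
    rw [List.foldl_map] at h
    simpa using h
  simp only [pv_setdefault_absorb, hcounts]
  have h3 : (fun (r : PySem.Dict Int (List (List (String × Int)))) cell =>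
        if ((((cs.map pvNiv).count (pvNiv cell) : Nat) : Int)) ≥ 2
          then r.modify (pvNiv cell) [] (fun l => l ++ [cell]) else r)
      = (fun r cell => if (fun c => decide (2 ≤ (cs.map pvNiv).count (pvNiv c))) cell = true
          then r.modify (pvNiv cell) [] (fun l => l ++ [cell]) else r) := by
    funext r cell
    refine if_congr ?_ rfl rfl
    rw [decide_eq_true_eq, ge_iff_le]
    exact ⟨fun h => by exact_mod_cast h, fun h => by exact_mod_cast h⟩
  rw [h3, ← List.foldl_filter]
  rfl

-- set(filter) = filter(set)
theorem pv_ofList_filter {α : Type} [BEq α] [LawfulBEq α] (q : α → Bool) (xs : List α) :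
    PySem.Set.ofList (xs.filter q) = (PySem.Set.ofList xs).filter q := by
  induction xs with
  | nil => rfl
  | cons x xs ih =>
    by_cases hq : q x = true
    · rw [List.filter_cons_of_pos hq, PySem.Set.ofList_cons, PySem.Set.ofList_cons, ih,
        List.filter_cons_of_pos hq]
      simp only [PySem.Set.discard, List.filter_filter]
      exact congrArg₂ _ rfl (List.filter_congr (fun y _ => by rw [Bool.and_comm]))
    · rw [List.filter_cons_of_neg hq, PySem.Set.ofList_cons, List.filter_cons_of_neg hq, ih]
      simp only [PySem.Set.discard, List.filter_filter]
      refine List.filter_congr (fun y _ => ?_)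
      by_cases hy : y = x
      · subst hy; simp [hq]
      · simp [hy]

-- the heart of the equivalence: length-filtered groups = groups of count-filtered cells
theorem pv_key (cs : List (List (String × Int))) (hpos : ∀ c ∈ cs, 0 < pvNiv c) :
    (pvGroup cs).items.filter (fun p => decide (p.2.length ≥ 2 ∧ p.1 > 0))
      = (pvGroup (cs.filter (fun c => decide (2 ≤ (cs.map pvNiv).count (pvNiv c))))).items := by
  rw [pvGroup_items, pvGroup_items, List.filter_map]
  have hcount : ∀ k : Int, (cs.filter (fun c => pvNiv c == k)).length = (cs.map pvNiv).count k := by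
    intro k
    rw [List.count_eq_countP, List.countP_map, List.countP_eq_length_filter]
    rfl
  have hkf : (PySem.Set.ofList (cs.map pvNiv)).filter
        ((fun p => decide (p.2.length ≥ 2 ∧ p.1 > 0)) ∘ (fun k => (k, cs.filter (fun c => pvNiv c == k))))
      = (PySem.Set.ofList (cs.map pvNiv)).filter (fun k => decide (2 ≤ (cs.map pvNiv).count k)) := by
    refine List.filter_congr (fun k hk => ?_)
    have h0 : 0 < k := by
      rw [PySem.Set.mem_ofList] at hk
      obtain ⟨c, hc, rfl⟩ := List.mem_map.mp hk
      exact hpos c hc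
    simp only [Function.comp_apply, hcount k]
    simp [h0]
  rw [hkf]
  have hns2 : (cs.filter (fun c => decide (2 ≤ (cs.map pvNiv).count (pvNiv c)))).map pvNiv
      = (cs.map pvNiv).filter (fun k => decide (2 ≤ (cs.map pvNiv).count k)) := by
    rw [List.filter_map]; rfl
  rw [hns2, pv_ofList_filter]
  refine List.map_congr_left (fun k hk => ?_)
  have h2 : 2 ≤ (cs.map pvNiv).count k := by
    have := (List.mem_filter.mp hk).2
    simpa using this
  refine congrArg (Prod.mk k) ?_
  rw [List.filter_filter]
  refine (List.filter_congr (fun c _ => ?_)).symm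
  by_cases hc : pvNiv c = k
  · simp [hc, h2]
  · simp [hc]

-- ===== VERDICT (by name: the statement is the Claim_ definition above) =====
theorem trouver_pelles_a_fusionner_spec : Claim_equal_trouver_pelles_a_fusionner := by
  intro matrix _ _
  unfold Spec_trouver_pelles_a_fusionner
  rw [portA_eq, portB_eq]
  exact pv_key _ (fun c hc => by simpa using (List.mem_filter.mp hc).2)
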